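-- pv_equiv track=rewrite | github.com/c2keesey/spotify-macro | automations/spotify/folder_sorter/action.py | _build_folder_artist_index
-- ===== SOURCE A (Python) =====
-- from typing import Dict, List, Set, Tuple
--
-- def _build_folder_artist_index(
--     folders_to_playlist_ids: Dict[str, List[str]],
--     playlist_loader_data: Dict[str, Dict],
-- ) -> Dict[str, Set[str]]:
--     """Build folder -> set[artist_id] from cached playlists referenced by the folder."""
--     index: Dict[str, Set[str]] = {}
--     for folder, pids in folders_to_playlist_ids.items():
--         artist_ids: Set[str] = set()
--         for pid in pids:
--             pdata = playlist_loader_data.get(pid)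
--             if not pdata:
--                 continue
--             for track in pdata.get("tracks", []):
--                 for artist in track.get("artists", []):
--                     aid = artist.get("id")
--                     if aid:
--                         artist_ids.add(aid)
--         index[folder] = artist_ids
--     return index
-- ===== SOURCE B (Python) =====
-- def _build_folder_artist_index(folders_to_playlist_ids, playlist_loader_data):
--     """Two-pass: precompute each playlist's artist set once, then union per folder."""
--     playlist_artists = {
--         pid: {a.get("id") for t in pdata.get("tracks", []) for a in t.get("artists", []) if a.get("id")}
--         for pid, pdata in playlist_loader_data.items()
--     }
--     index = {}
--     for folder, pids in folders_to_playlist_ids.items():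
--         acc = set()
--         for pid in pids:
--             acc |= playlist_artists.get(pid, set())
--         index[folder] = acc
--     return index
-- ===== Notes on version B (the rewrite author's own statement) =====
-- stated objective: alternative
-- what changed: Replaces A's single fused pass (re-walking each referenced playlist's tracks inside the folder loop, with nested add-loops) by two separate passes: first a precomputed table mapping each playlist id to its artist-id set built with a set comprehension, then a per-folder loop that only unions the cached sets; each playlist's tracks are walked once instead of once per referencing folder.
import Mathlib
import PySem

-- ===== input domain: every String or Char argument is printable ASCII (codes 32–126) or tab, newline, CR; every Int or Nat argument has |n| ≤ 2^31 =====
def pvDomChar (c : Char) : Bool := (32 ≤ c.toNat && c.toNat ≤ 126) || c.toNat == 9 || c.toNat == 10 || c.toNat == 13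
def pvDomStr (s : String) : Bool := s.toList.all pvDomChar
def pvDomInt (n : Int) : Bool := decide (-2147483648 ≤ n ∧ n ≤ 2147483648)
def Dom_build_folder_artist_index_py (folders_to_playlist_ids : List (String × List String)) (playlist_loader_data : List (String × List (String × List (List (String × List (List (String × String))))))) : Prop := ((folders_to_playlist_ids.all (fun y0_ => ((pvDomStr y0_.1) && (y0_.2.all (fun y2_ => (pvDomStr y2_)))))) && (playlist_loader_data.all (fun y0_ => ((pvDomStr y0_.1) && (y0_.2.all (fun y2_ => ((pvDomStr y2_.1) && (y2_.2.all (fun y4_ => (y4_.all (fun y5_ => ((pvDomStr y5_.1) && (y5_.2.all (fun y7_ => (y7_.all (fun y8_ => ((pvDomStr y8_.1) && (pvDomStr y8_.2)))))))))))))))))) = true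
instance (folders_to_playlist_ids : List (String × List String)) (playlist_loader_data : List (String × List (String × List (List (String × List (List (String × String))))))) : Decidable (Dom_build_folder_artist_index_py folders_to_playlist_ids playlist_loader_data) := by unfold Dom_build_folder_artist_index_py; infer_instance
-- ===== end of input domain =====

-- B precomputes every playlist's artist-id set once in a table (set comprehension), then the folder
-- loop only unions cached sets, instead of A's fused pass that re-extracts artists per referencing folder.
-- Equivalence of the RETURN value; both are pure.

-- ===== PORT A =====
def build_folder_artist_index_py (folders_to_playlist_ids : List (String × List String)) (playlist_loader_data : List (String × List (String × List (List (String × List (List (String × String))))))) : List (String × List String) :=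
  let dataD := PySem.Dict.ofList playlist_loader_data
  ((PySem.Dict.ofList folders_to_playlist_ids).items.foldl (fun index fp =>
      let artist_ids : PySem.Set String :=
        fp.2.foldl (fun s pid =>
          match dataD.get? pid with
          | none => s          -- pid not cached
          | some pdata =>
            if pdata = [] then s          -- 'if not pdata: continue' (empty dict is falsy)
            else
              ((PySem.Dict.ofList pdata).getD "tracks" []).foldl (fun s track =>
                ((PySem.Dict.ofList track).getD "artists" []).foldl (fun s artist =>
                  match (PySem.Dict.ofList artist).get? "id" with
                  | some aid => if aid ≠ "" then PySem.Set.add s aid else s   -- 'if aid:'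
                  | none => s) s) s) PySem.Set.empty
      index.insert fp.1 artist_ids) PySem.Dict.empty).items

-- ===== PORT B =====
-- the set comprehension {a.get("id") for t in pdata.get("tracks", []) for a in t.get("artists", []) if a.get("id")}
def pvAids (pdata : List (String × List (List (String × List (List (String × String)))))) : List String :=
  ((PySem.Dict.ofList pdata).getD "tracks" []).flatMap (fun track =>
    ((PySem.Dict.ofList track).getD "artists" []).filterMap (fun artist =>
      match (PySem.Dict.ofList artist).get? "id" with
      | some aid => if aid ≠ "" then some aid else none
      | none => none))

def build_folder_artist_index_py_alt (folders_to_playlist_ids : List (String × List String)) (playlist_loader_data : List (String × List (String × List (List (String × List (List (String × String))))))) : List (String × List String) :=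
  let playlist_artists : PySem.Dict String (PySem.Set String) :=
    (PySem.Dict.ofList playlist_loader_data).items.foldl
      (fun t p => t.insert p.1 (PySem.Set.ofList (pvAids p.2))) PySem.Dict.empty
  ((PySem.Dict.ofList folders_to_playlist_ids).items.foldl (fun index fp =>
      index.insert fp.1
        (fp.2.foldl (fun acc pid => PySem.Set.union acc (playlist_artists.getD pid PySem.Set.empty))
          PySem.Set.empty)) PySem.Dict.empty).items

-- ===== PRECONDITION & SPEC =====
def Spec_build_folder_artist_index_py (folders_to_playlist_ids : List (String × List String)) (playlist_loader_data : List (String × List (String × List (List (String × List (List (String × String))))))) (out : List (String × List String)) : Prop := out = build_folder_artist_index_py_alt folders_to_playlist_ids playlist_loader_data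
-- reducible shorthand for the playlist-cache type, used only in the instance binder below
abbrev pvLoaderData : Type := List (String × List (String × List (List (String × List (List (String × String))))))
instance (folders_to_playlist_ids : List (String × List String)) (playlist_loader_data : pvLoaderData) (out : List (String × List String)) : Decidable (Spec_build_folder_artist_index_py folders_to_playlist_ids playlist_loader_data out) := by unfold Spec_build_folder_artist_index_py; infer_instance

-- ===== CLAIM (what is proved, stated in full; the proofs are below) =====
def Claim_equal_build_folder_artist_index_py : Prop := ∀ (folders_to_playlist_ids : List (String × List String)) (playlist_loader_data : List (String × List (String × List (List (String × List (List (String × String))))))), Dom_build_folder_artist_index_py folders_to_playlist_ids playlist_loader_data → Spec_build_folder_artist_index_py folders_to_playlist_ids playlist_loader_data (build_folder_artist_index_py folders_to_playlist_ids playlist_loader_data)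

-- ===== LEMMAS AND PROOFS =====

-- the truthy-id extractor shared by both Pythons' innermost step
def pvIdOf (artist : List (String × String)) : Option String :=
  match (PySem.Dict.ofList artist).get? "id" with
  | some aid => if aid ≠ "" then some aid else none
  | none => none

-- adding the deduplicated elements is adding the elements: s.update(set(xs)) = s.update(xs)
theorem pv_update_ofList (s : PySem.Set String) (xs : List String) :
    PySem.Set.update s (PySem.Set.ofList xs) = PySem.Set.update s xs := by
  rw [PySem.Set.update_eq_append_filter, PySem.Set.update_eq_append_filter,
    PySem.Set.ofList_ofList]

-- A's innermost artists loop is a fold of add over the filterMapped truthy ids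
theorem pv_artists_fold (artists : List (List (String × String))) (s : PySem.Set String) :
    artists.foldl (fun s artist =>
        match (PySem.Dict.ofList artist).get? "id" with
        | some aid => if aid ≠ "" then PySem.Set.add s aid else s
        | none => s) s
      = List.foldl PySem.Set.add s (artists.filterMap pvIdOf) := by
  induction artists generalizing s with
  | nil => rfl
  | cons a t ih =>
    have hid : pvIdOf a = match (PySem.Dict.ofList a).get? "id" with
      | some aid => if aid ≠ "" then some aid else none
      | none => none := rfl
    simp only [List.foldl_cons, List.filterMap_cons, hid]
    cases h : (PySem.Dict.ofList a).get? "id" with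
    | none => exact ih s
    | some aid =>
      by_cases haid : aid = ""
      · simp only [haid, ne_eq, not_true_eq_false, if_false]
        exact ih s
      · simp only [ne_eq, haid, not_false_eq_true, if_true]
        exact ih (PySem.Set.add s aid)

-- A's tracks × artists nested loops are a fold of add over pvAids
theorem pv_tracks_fold (pdata : List (String × List (List (String × List (List (String × String)))))) (s : PySem.Set String) :
    ((PySem.Dict.ofList pdata).getD "tracks" []).foldl (fun s track =>
        ((PySem.Dict.ofList track).getD "artists" []).foldl (fun s artist =>
          match (PySem.Dict.ofList artist).get? "id" with
          | some aid => if aid ≠ "" then PySem.Set.add s aid else s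
          | none => s) s) s
      = List.foldl PySem.Set.add s (pvAids pdata) := by
  rw [pvAids, List.foldl_flatMap]
  exact PySem.List.foldl_congr_mem _ _ _ s (fun acc x _ => pv_artists_fold _ acc)

-- the precomputed table looks up exactly what A recomputes per reference
theorem pv_table_getD (data : List (String × List (String × List (List (String × List (List (String × String))))))) (pid : String) :
    ((PySem.Dict.ofList data).items.foldl
        (fun t p => t.insert p.1 (PySem.Set.ofList (pvAids p.2))) PySem.Dict.empty).getD pid PySem.Set.empty
      = match (PySem.Dict.ofList data).get? pid with
        | none => PySem.Set.empty
        | some pdata => PySem.Set.ofList (pvAids pdata) := by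
  have hitems := PySem.Dict.items_foldl_insert_fresh (PySem.Dict.ofList data).items
    Prod.fst (fun p => PySem.Set.ofList (pvAids p.2)) PySem.Dict.empty
    (fun a _ => PySem.Dict.contains_empty a.1)
    (PySem.Dict.nodup_keys_ofList data)
  have hitems2 : ((PySem.Dict.ofList data).items.foldl
        (fun t p => t.insert p.1 (PySem.Set.ofList (pvAids p.2))) PySem.Dict.empty).items
      = List.map (fun a => (a.1, PySem.Set.ofList (pvAids a.2))) (PySem.Dict.ofList data).items := by
    rw [hitems]; rfl
  simp only [PySem.Dict.getD, PySem.Dict.get?, hitems2, List.find?_map]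
  cases h : List.find? (fun p => p.1 == pid) (PySem.Dict.ofList data).items with
  | none =>
    have h' : List.find? ((fun p => p.1 == pid) ∘ fun a => (a.1, PySem.Set.ofList (pvAids a.2)))
        (PySem.Dict.ofList data).items = none := h
    rw [h']; rfl
  | some p =>
    have h' : List.find? ((fun p => p.1 == pid) ∘ fun a => (a.1, PySem.Set.ofList (pvAids a.2)))
        (PySem.Dict.ofList data).items = some p := h
    rw [h']; rfl

-- ===== VERDICT (by name: the statement is the Claim_ definition above) =====
theorem build_folder_artist_index_py_spec : Claim_equal_build_folder_artist_index_py := by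
  intro folders data _
  unfold Spec_build_folder_artist_index_py
  unfold build_folder_artist_index_py build_folder_artist_index_py_alt
  refine congrArg PySem.Dict.items ?_
  refine PySem.List.foldl_congr_mem _ _ _ _ (fun index fp _ => ?_)
  refine congrArg (index.insert fp.1) ?_
  refine PySem.List.foldl_congr_mem _ _ _ _ (fun acc pid _ => ?_)
  rw [pv_table_getD]
  cases h : (PySem.Dict.ofList data).get? pid with
  | none => rfl
  | some pdata =>
    show (if pdata = [] then acc else _) = PySem.Set.union acc (PySem.Set.ofList (pvAids pdata))
    rw [show PySem.Set.union acc (PySem.Set.ofList (pvAids pdata))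
        = PySem.Set.update acc (PySem.Set.ofList (pvAids pdata)) from rfl,
      pv_update_ofList]
    by_cases hp : pdata = []
    · subst hp; rfl
    · simp only [hp, if_false]
      exact pv_tracks_fold pdata acc
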